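-- pv_equiv track=rewrite | github.com/ILikeHotpott/prediction-market | backend/market/views/series.py | _aggregate_to_buckets
-- ===== SOURCE A (Python) =====
-- def _aggregate_to_buckets(points, bucket_seconds):
--     """Aggregate raw points into larger time buckets, taking the last value in each bucket."""
--     if not points or bucket_seconds <= 5:
--         return points
--
--     buckets = {}
--     for p in points:
--         bucket_ts = (p["timestamp"] // bucket_seconds) * bucket_seconds
--         # Keep the latest value in each bucket
--         if bucket_ts not in buckets or p["timestamp"] > buckets[bucket_ts]["timestamp"]:
--             buckets[bucket_ts] = p
--
--     return sorted(buckets.values(), key=lambda x: x["timestamp"])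
-- ===== SOURCE B (Python) =====
-- def _aggregate_to_buckets(points, bucket_seconds):
--     """Aggregate raw points into larger time buckets, taking the last value in each bucket."""
--     if not points or bucket_seconds <= 5:
--         return points
--
--     # Pass 1: the maximal timestamp seen in each bucket (bucket index = ts // bucket_seconds).
--     best = {}
--     for p in points:
--         b = p["timestamp"] // bucket_seconds
--         best[b] = max(best[b], p["timestamp"]) if b in best else p["timestamp"]
--
--     # Pass 2: for each bucket, the first point attaining that maximal timestamp.
--     reps = {}
--     for p in points:
--         b = p["timestamp"] // bucket_seconds
--         if b not in reps and p["timestamp"] == best[b]: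
--             reps[b] = p
--
--     return [reps[b] for b in sorted(reps)]
-- ===== Notes on version B (the rewrite author's own statement) =====
-- stated objective: alternative
-- what changed: Replaces A's single conditional-overwrite dict pass followed by a sort of the bucket values with a two-phase plan: one pass records the maximal timestamp per bucket index, a second pass picks the first point attaining that maximum, and the result is read off the sorted bucket keys (no sort of the point dicts).
import Mathlib
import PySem

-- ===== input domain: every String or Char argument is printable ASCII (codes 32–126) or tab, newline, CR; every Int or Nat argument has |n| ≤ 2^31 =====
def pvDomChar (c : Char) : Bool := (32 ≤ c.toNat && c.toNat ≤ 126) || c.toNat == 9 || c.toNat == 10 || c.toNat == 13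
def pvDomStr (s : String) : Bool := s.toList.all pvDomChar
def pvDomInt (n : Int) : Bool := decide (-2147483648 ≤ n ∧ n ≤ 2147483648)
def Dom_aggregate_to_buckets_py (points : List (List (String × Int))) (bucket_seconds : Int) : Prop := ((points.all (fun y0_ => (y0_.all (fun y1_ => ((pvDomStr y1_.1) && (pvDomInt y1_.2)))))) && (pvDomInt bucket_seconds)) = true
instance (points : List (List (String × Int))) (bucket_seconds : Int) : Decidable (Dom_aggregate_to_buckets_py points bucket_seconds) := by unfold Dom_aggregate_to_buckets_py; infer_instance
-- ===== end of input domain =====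

-- B replaces A's conditional-overwrite dict pass + sort of the point dicts by two passes
-- (max timestamp per bucket, then first point attaining it) read off over sorted bucket keys;
-- objective: alternative decomposition (not claimed faster).

-- ===== PORT A =====
-- shared by both ports: p["timestamp"] : first-match lookup in the point's association list (key present inside Pre_)
def pvTsA (p : List (String × Int)) : Int := ((PySem.Dict.mk p).get? "timestamp").getD 0

def pvStepA (bucket_seconds : Int) (buckets : PySem.Dict Int (List (String × Int))) (p : List (String × Int)) : PySem.Dict Int (List (String × Int)) :=
  let bucket_ts := PySem.Int.floordiv (pvTsA p) bucket_seconds * bucket_seconds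
  if !(buckets.contains bucket_ts) || decide (pvTsA (buckets.getD bucket_ts []) < pvTsA p)
  then buckets.insert bucket_ts p else buckets

def aggregate_to_buckets_py (points : List (List (String × Int))) (bucket_seconds : Int) : List (List (String × Int)) :=
  if points = [] ∨ bucket_seconds ≤ 5 then points
  else
    let buckets := points.foldl (pvStepA bucket_seconds) PySem.Dict.empty
    PySem.List.sorted buckets.values (fun x => pvTsA x) false

-- ===== PORT B =====
def pvStepBest (bucket_seconds : Int) (best : PySem.Dict Int Int) (p : List (String × Int)) : PySem.Dict Int Int :=
  let b := PySem.Int.floordiv (pvTsA p) bucket_seconds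
  best.insert b (if best.contains b then max (best.getD b 0) (pvTsA p) else pvTsA p)

def pvStepReps (bucket_seconds : Int) (best : PySem.Dict Int Int) (reps : PySem.Dict Int (List (String × Int))) (p : List (String × Int)) : PySem.Dict Int (List (String × Int)) :=
  let b := PySem.Int.floordiv (pvTsA p) bucket_seconds
  if !(reps.contains b) && (pvTsA p == best.getD b 0) then reps.insert b p else reps

def aggregate_to_buckets_py_alt (points : List (List (String × Int))) (bucket_seconds : Int) : List (List (String × Int)) :=
  if points = [] ∨ bucket_seconds ≤ 5 then points
  else
    let best := points.foldl (pvStepBest bucket_seconds) PySem.Dict.empty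
    let reps := points.foldl (pvStepReps bucket_seconds best) PySem.Dict.empty
    (PySem.List.sorted reps.keys (fun b => b) false).map (fun b => reps.getD b [])

-- ===== PRECONDITION & SPEC =====
-- Pre_ excludes exactly the inputs where Python A raises KeyError: a nonempty points list reaching
-- the aggregation loop (bucket_seconds > 5) while some point lacks the "timestamp" key.
def Pre_aggregate_to_buckets_py (points : List (List (String × Int))) (bucket_seconds : Int) : Prop :=
  points = [] ∨ bucket_seconds ≤ 5 ∨ ∀ p ∈ points, "timestamp" ∈ p.map Prod.fst
instance (points : List (List (String × Int))) (bucket_seconds : Int) : Decidable (Pre_aggregate_to_buckets_py points bucket_seconds) := by unfold Pre_aggregate_to_buckets_py; infer_instance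

def pvWitness_aggregate_to_buckets_py : (List (List (String × Int))) × Int :=
  ([[("timestamp", 10), ("v", 1)], [("timestamp", 95)], [("timestamp", 11)]], 60)

def Spec_aggregate_to_buckets_py (points : List (List (String × Int))) (bucket_seconds : Int) (out : List (List (String × Int))) : Prop := out = aggregate_to_buckets_py_alt points bucket_seconds
instance (points : List (List (String × Int))) (bucket_seconds : Int) (out : List (List (String × Int))) : Decidable (Spec_aggregate_to_buckets_py points bucket_seconds out) := by unfold Spec_aggregate_to_buckets_py; infer_instance

-- ===== CLAIM (what is proved, stated in full; the proofs are below) =====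
def Claim_equal_aggregate_to_buckets_py : Prop := ∀ (points : List (List (String × Int))) (bucket_seconds : Int), Dom_aggregate_to_buckets_py points bucket_seconds → Pre_aggregate_to_buckets_py points bucket_seconds → Spec_aggregate_to_buckets_py points bucket_seconds (aggregate_to_buckets_py points bucket_seconds)

-- ===== LEMMAS AND PROOFS =====

-- the running "keep the strictly later point" step of A, at one fixed bucket
def pvPick (acc : Option (List (String × Int))) (p : List (String × Int)) : Option (List (String × Int)) :=
  match acc with
  | none => some p
  | some q => if pvTsA q < pvTsA p then some p else acc

-- maximum of the timestamps of a :: u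
def pvMaxTs (a : List (String × Int)) (u : List (List (String × Int))) : Int :=
  u.foldl (fun w p => max w (pvTsA p)) (pvTsA a)


theorem pv_stepA_get? (bs : Int) (d : PySem.Dict Int (List (String × Int))) (p : List (String × Int)) (k : Int) :
    (pvStepA bs d p).get? k = if PySem.Int.floordiv (pvTsA p) bs * bs = k then pvPick (d.get? k) p else d.get? k := by
  unfold pvStepA pvPick
  by_cases hjk : PySem.Int.floordiv (pvTsA p) bs * bs = k
  · subst hjk
    cases hc : d.get? (PySem.Int.floordiv (pvTsA p) bs * bs) with
    | none =>
        have hcc : d.contains (PySem.Int.floordiv (pvTsA p) bs * bs) = false := by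
          rw [PySem.Dict.contains_eq_isSome_get?, hc]; rfl
        simp [hcc, PySem.Dict.get?_insert, hc]
    | some q =>
        have hcc : d.contains (PySem.Int.floordiv (pvTsA p) bs * bs) = true := by
          rw [PySem.Dict.contains_eq_isSome_get?, hc]; rfl
        have hgd : d.getD (PySem.Int.floordiv (pvTsA p) bs * bs) [] = q :=
          PySem.Dict.getD_of_get?_eq_some d ([]) hc
        by_cases hlt : pvTsA q < pvTsA p
        · simp [hcc, hgd, hlt, PySem.Dict.get?_insert, hc]
        · simp [hcc, hgd, hlt, hc]
  · by_cases hcond : (!(d.contains (PySem.Int.floordiv (pvTsA p) bs * bs)) || decide (pvTsA (d.getD (PySem.Int.floordiv (pvTsA p) bs * bs) []) < pvTsA p)) = true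
    · simp only [hcond, if_true, if_pos]
      rw [PySem.Dict.get?_insert, if_neg (fun h => hjk h.symm), if_neg hjk]
    · simp [hcond, hjk]

theorem pv_stepBest_get? (bs : Int) (m : PySem.Dict Int Int) (p : List (String × Int)) (b : Int) :
    (pvStepBest bs m p).get? b = if PySem.Int.floordiv (pvTsA p) bs = b then
        some (match m.get? b with | none => pvTsA p | some w => max w (pvTsA p)) else m.get? b := by
  unfold pvStepBest
  by_cases hjk : PySem.Int.floordiv (pvTsA p) bs = b
  · subst hjk
    cases hc : m.get? (PySem.Int.floordiv (pvTsA p) bs) with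
    | none =>
        have hcc : m.contains (PySem.Int.floordiv (pvTsA p) bs) = false := by
          rw [PySem.Dict.contains_eq_isSome_get?, hc]; rfl
        simp [hcc, PySem.Dict.get?_insert]
    | some w =>
        have hcc : m.contains (PySem.Int.floordiv (pvTsA p) bs) = true := by
          rw [PySem.Dict.contains_eq_isSome_get?, hc]; rfl
        have hgd : m.getD (PySem.Int.floordiv (pvTsA p) bs) 0 = w :=
          PySem.Dict.getD_of_get?_eq_some m 0 hc
        simp [hcc, hgd, PySem.Dict.get?_insert]
  · rw [PySem.Dict.get?_insert, if_neg (fun h => hjk h.symm), if_neg hjk]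

theorem pv_stepReps_get? (bs : Int) (best : PySem.Dict Int Int) (r : PySem.Dict Int (List (String × Int))) (p : List (String × Int)) (b : Int) :
    (pvStepReps bs best r p).get? b = if PySem.Int.floordiv (pvTsA p) bs = b then
        (if r.get? b = none ∧ pvTsA p = best.getD b 0 then some p else r.get? b) else r.get? b := by
  unfold pvStepReps
  by_cases hjk : PySem.Int.floordiv (pvTsA p) bs = b
  · rw [if_pos hjk]
    cases hc : r.get? b with
    | none =>
        have hcc : r.contains (PySem.Int.floordiv (pvTsA p) bs) = false := by
          rw [PySem.Dict.contains_eq_isSome_get?, hjk, hc]; rfl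
        by_cases he : pvTsA p = best.getD b 0
        · have hb2 : (pvTsA p == best.getD (PySem.Int.floordiv (pvTsA p) bs) 0) = true := by
            rw [hjk]; exact beq_iff_eq.mpr he
          rw [if_pos (by rw [hcc, hb2]; rfl), PySem.Dict.get?_insert, if_pos hjk.symm,
            if_pos ⟨rfl, he⟩]
        · have hb2 : (pvTsA p == best.getD (PySem.Int.floordiv (pvTsA p) bs) 0) = false := by
            rw [hjk]; exact beq_eq_false_iff_ne.mpr he
          rw [if_neg (by rw [hb2]; simp), if_neg (fun hcon => he hcon.2)]
          exact hc
    | some q =>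
        have hcc : r.contains (PySem.Int.floordiv (pvTsA p) bs) = true := by
          rw [PySem.Dict.contains_eq_isSome_get?, hjk, hc]; rfl
        rw [if_neg (by rw [hcc]; simp), if_neg (fun hcon => by simp at hcon)]
        exact hc
  · rw [if_neg hjk]
    by_cases hcond : (!(r.contains (PySem.Int.floordiv (pvTsA p) bs)) && (pvTsA p == best.getD (PySem.Int.floordiv (pvTsA p) bs) 0)) = true
    · rw [if_pos hcond, PySem.Dict.get?_insert, if_neg (fun h => hjk h.symm)]
    · rw [if_neg hcond]

-- projection of A's dict fold to one key
theorem pv_getA (bs : Int) (l : List (List (String × Int))) (d : PySem.Dict Int (List (String × Int))) (k : Int) :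
    (l.foldl (pvStepA bs) d).get? k =
      l.foldl (fun acc p => if PySem.Int.floordiv (pvTsA p) bs * bs = k then pvPick acc p else acc) (d.get? k) := by
  induction l generalizing d with
  | nil => rfl
  | cons p t ih =>
      simp only [List.foldl_cons]
      rw [ih, pv_stepA_get?]

-- projection of B's best fold to one key
theorem pv_getBest (bs : Int) (l : List (List (String × Int))) (m : PySem.Dict Int Int) (b : Int) :
    (l.foldl (pvStepBest bs) m).get? b =
      l.foldl (fun acc p => if PySem.Int.floordiv (pvTsA p) bs = b then
          some (match acc with | none => pvTsA p | some w => max w (pvTsA p)) else acc) (m.get? b) := by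
  induction l generalizing m with
  | nil => rfl
  | cons p t ih =>
      simp only [List.foldl_cons]
      rw [ih, pv_stepBest_get?]

-- projection of B's reps fold to one key
theorem pv_getReps (bs : Int) (best : PySem.Dict Int Int) (l : List (List (String × Int))) (r : PySem.Dict Int (List (String × Int))) (b : Int) :
    (l.foldl (pvStepReps bs best) r).get? b =
      l.foldl (fun acc p => if PySem.Int.floordiv (pvTsA p) bs = b then
          (if acc = none ∧ pvTsA p = best.getD b 0 then some p else acc) else acc) (r.get? b) := by
  induction l generalizing r with
  | nil => rfl
  | cons p t ih =>
      simp only [List.foldl_cons]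
      rw [ih, pv_stepReps_get?]

theorem pv_maxfold_some (u : List (List (String × Int))) (v : Int) :
    u.foldl (fun acc p => some (match acc with | none => pvTsA p | some w => max w (pvTsA p))) (some v)
      = some (u.foldl (fun w p => max w (pvTsA p)) v) := by
  induction u generalizing v with
  | nil => rfl
  | cons p t ih => simp only [List.foldl_cons]; exact ih _

theorem pv_find_some (P : List (String × Int) → Prop) [DecidablePred P] (u : List (List (String × Int))) (a : List (String × Int)) :
    u.foldl (fun acc p => if acc = none ∧ P p then some p else acc) (some a) = some a := by
  induction u with
  | nil => rfl
  | cons p t ih => simp only [List.foldl_cons]; simpa using ih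

theorem pv_findfold (P : List (String × Int) → Prop) [DecidablePred P] (u : List (List (String × Int))) :
    u.foldl (fun acc p => if acc = none ∧ P p then some p else acc) none = u.find? (fun p => decide (P p)) := by
  induction u with
  | nil => rfl
  | cons p t ih =>
      simp only [List.foldl_cons, List.find?_cons]
      by_cases hp : P p
      · simp [hp, pv_find_some]
      · simp [hp, ih]

theorem pv_pick_some (u : List (List (String × Int))) (a : List (String × Int)) :
    ∃ r, u.foldl pvPick (some a) = some r := by
  induction u generalizing a with
  | nil => exact ⟨a, rfl⟩
  | cons q t ih =>
      simp only [List.foldl_cons, pvPick]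
      by_cases h : pvTsA a < pvTsA q
      · simpa [h] using ih q
      · simpa [h] using ih a

theorem pv_le_maxfold (u : List (List (String × Int))) (i : Int) :
    i ≤ u.foldl (fun w p => max w (pvTsA p)) i := by
  induction u generalizing i with
  | nil => exact le_refl i
  | cons p t ih =>
      simp only [List.foldl_cons]
      exact le_trans (le_max_left _ _) (ih _)

-- A's running-max-with-strict-replacement fold picks the FIRST point attaining the maximum
theorem pv_core (u : List (List (String × Int))) (a : List (String × Int)) :
    u.foldl pvPick (some a) = (a :: u).find? (fun p => decide (pvTsA p = pvMaxTs a u)) := by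
  induction u generalizing a with
  | nil => simp [pvMaxTs, List.find?]
  | cons q t ih =>
      simp only [List.foldl_cons, pvPick]
      by_cases h : pvTsA a < pvTsA q
      · rw [if_pos h, ih q]
        have hM : pvMaxTs a (q :: t) = pvMaxTs q t := by
          simp only [pvMaxTs, List.foldl_cons]
          rw [max_eq_right h.le]
        rw [hM]
        have hq : pvTsA q ≤ pvMaxTs q t := pv_le_maxfold t (pvTsA q)
        have ha : pvTsA a ≠ pvMaxTs q t := by omega
        exact (List.find?_cons_of_neg (by simp [ha])).symm
      · rw [if_neg h, ih a]
        have hqa : pvTsA q ≤ pvTsA a := by omega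
        have hM : pvMaxTs a (q :: t) = pvMaxTs a t := by
          simp only [pvMaxTs, List.foldl_cons]
          rw [max_eq_left hqa]
        rw [hM]
        have h1 : pvTsA a ≤ pvMaxTs a t := pv_le_maxfold t (pvTsA a)
        by_cases ha : pvTsA a = pvMaxTs a t
        · rw [List.find?_cons_of_pos (by simp [ha]), List.find?_cons_of_pos (by simp [ha])]
        · have hq : pvTsA q ≠ pvMaxTs a t := by omega
          rw [List.find?_cons_of_neg (by simp [ha]), List.find?_cons_of_neg (by simp [ha]),
            List.find?_cons_of_neg (by simp [hq])]

-- keys of the folds stay Nodup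
theorem pv_nodupA (bs : Int) (l : List (List (String × Int))) (d : PySem.Dict Int (List (String × Int))) (h : d.keys.Nodup) :
    (l.foldl (pvStepA bs) d).keys.Nodup := by
  induction l generalizing d with
  | nil => exact h
  | cons p t ih =>
      apply ih
      unfold pvStepA
      simp only []
      split
      · exact PySem.Dict.nodup_keys_insert _ _ _ h
      · exact h

theorem pv_nodupReps (bs : Int) (best : PySem.Dict Int Int) (l : List (List (String × Int))) (r : PySem.Dict Int (List (String × Int))) (h : r.keys.Nodup) :
    (l.foldl (pvStepReps bs best) r).keys.Nodup := by
  induction l generalizing r with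
  | nil => exact h
  | cons p t ih =>
      apply ih
      unfold pvStepReps
      simp only []
      split
      · exact PySem.Dict.nodup_keys_insert _ _ _ h
      · exact h

-- ---- assembly helpers (proof-only shorthands for the three dict folds) ----
def pvDA (points : List (List (String × Int))) (bs : Int) : PySem.Dict Int (List (String × Int)) :=
  points.foldl (pvStepA bs) PySem.Dict.empty
def pvBest (points : List (List (String × Int))) (bs : Int) : PySem.Dict Int Int :=
  points.foldl (pvStepBest bs) PySem.Dict.empty
def pvReps (points : List (List (String × Int))) (bs : Int) : PySem.Dict Int (List (String × Int)) :=
  points.foldl (pvStepReps bs (pvBest points bs)) PySem.Dict.empty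
def pvLf (points : List (List (String × Int))) (bs b : Int) : List (List (String × Int)) :=
  points.filter (fun p => decide (PySem.Int.floordiv (pvTsA p) bs = b))

theorem pv_guard_filter {β : Type} (key : List (String × Int) → Int) (b : Int)
    (f : β → List (String × Int) → β) (l : List (List (String × Int))) (init : β) :
    l.foldl (fun acc p => if key p = b then f acc p else acc) init
      = (l.filter (fun p => decide (key p = b))).foldl f init := by
  have h := List.foldl_filter (p := fun p => decide (key p = b)) (f := f) (l := l) (init := init)
  simp only [decide_eq_true_eq] at h
  exact h.symm

theorem pv_pickfold_filter (points : List (List (String × Int))) (bs j : Int) :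
    (pvDA points bs).get? j
      = (points.filter (fun p => decide (PySem.Int.floordiv (pvTsA p) bs * bs = j))).foldl pvPick none := by
  unfold pvDA
  rw [pv_getA]
  simp only [PySem.Dict.get?_empty]
  exact pv_guard_filter (fun p => PySem.Int.floordiv (pvTsA p) bs * bs) j pvPick points none

theorem pv_picklist_none_iff (l : List (List (String × Int))) :
    l.foldl pvPick none = none ↔ l = [] := by
  cases l with
  | nil => simp
  | cons a u =>
      simp only [List.foldl_cons]
      obtain ⟨r, hr⟩ := pv_pick_some u a
      have : pvPick none a = some a := rfl
      rw [this, hr]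
      simp

theorem pv_filterK_congr (points : List (List (String × Int))) (bs b : Int) (hb0 : 0 < bs) :
    points.filter (fun p => decide (PySem.Int.floordiv (pvTsA p) bs * bs = b * bs)) = pvLf points bs b := by
  unfold pvLf
  refine List.filter_congr (fun p _ => ?_)
  simp only [decide_eq_decide]
  constructor
  · exact fun h => mul_right_cancel₀ (by omega) h
  · exact fun h => by rw [h]

theorem pv_reps_get? (points : List (List (String × Int))) (bs b : Int) :
    (pvReps points bs).get? b =
      match pvLf points bs b with
      | [] => none
      | a :: u => (a :: u).find? (fun p => decide (pvTsA p = pvMaxTs a u)) := by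
  unfold pvReps
  rw [pv_getReps]
  simp only [PySem.Dict.get?_empty]
  rw [pv_guard_filter (fun p => PySem.Int.floordiv (pvTsA p) bs) b _ points none]
  show (pvLf points bs b).foldl _ none = _
  cases hL : pvLf points bs b with
  | nil => rfl
  | cons a u =>
      have hbest : (pvBest points bs).get? b = some (pvMaxTs a u) := by
        unfold pvBest
        rw [pv_getBest]
        simp only [PySem.Dict.get?_empty]
        rw [pv_guard_filter (fun p => PySem.Int.floordiv (pvTsA p) bs) b _ points none]
        show (pvLf points bs b).foldl _ none = _
        rw [hL]
        simp only [List.foldl_cons]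
        exact pv_maxfold_some u (pvTsA a)
      have hbd : (pvBest points bs).getD b 0 = pvMaxTs a u := by
        rw [PySem.Dict.getD_eq_get?_getD, hbest]
        rfl
      rw [hbd, pv_findfold (P := fun p => pvTsA p = pvMaxTs a u)]

theorem pv_DA_get? (points : List (List (String × Int))) (bs b : Int) (hb0 : 0 < bs) :
    (pvDA points bs).get? (b * bs) =
      match pvLf points bs b with
      | [] => none
      | a :: u => (a :: u).find? (fun p => decide (pvTsA p = pvMaxTs a u)) := by
  rw [pv_pickfold_filter, pv_filterK_congr points bs b hb0]
  cases hL : pvLf points bs b with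
  | nil => rfl
  | cons a u =>
      simp only [List.foldl_cons]
      have : pvPick none a = some a := rfl
      rw [this]
      exact pv_core u a

theorem pv_lf_ne_nil_iff (points : List (List (String × Int))) (bs b : Int) :
    pvLf points bs b ≠ [] ↔ ∃ p ∈ points, PySem.Int.floordiv (pvTsA p) bs = b := by
  unfold pvLf
  rw [Ne, List.filter_eq_nil_iff]
  push_neg
  simp

theorem pv_reps_none_iff (points : List (List (String × Int))) (bs b : Int) :
    (pvReps points bs).get? b = none ↔ pvLf points bs b = [] := by
  rw [pv_reps_get?]
  cases hL : pvLf points bs b with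
  | nil => simp
  | cons a u =>
      simp only []
      rw [← pv_core]
      obtain ⟨r, hr⟩ := pv_pick_some u a
      rw [hr]
      simp

theorem pv_mem_keysR (points : List (List (String × Int))) (bs b : Int) :
    b ∈ (pvReps points bs).keys ↔ ∃ p ∈ points, PySem.Int.floordiv (pvTsA p) bs = b := by
  have h1 := pv_reps_none_iff points bs b
  constructor
  · intro h
    apply (pv_lf_ne_nil_iff points bs b).mp
    intro hnil
    exact (PySem.Dict.get?_eq_none_iff_not_mem_keys _ _).mp (h1.mpr hnil) h
  · intro hex
    by_contra hnot
    have := (PySem.Dict.get?_eq_none_iff_not_mem_keys _ _).mpr hnot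
    exact ((pv_lf_ne_nil_iff points bs b).mpr hex) (h1.mp this)

theorem pv_mem_keysA (points : List (List (String × Int))) (bs j : Int) :
    j ∈ (pvDA points bs).keys ↔ ∃ p ∈ points, PySem.Int.floordiv (pvTsA p) bs * bs = j := by
  have h1 : (pvDA points bs).get? j = none
      ↔ points.filter (fun p => decide (PySem.Int.floordiv (pvTsA p) bs * bs = j)) = [] := by
    rw [pv_pickfold_filter]
    exact pv_picklist_none_iff _
  have h2 : points.filter (fun p => decide (PySem.Int.floordiv (pvTsA p) bs * bs = j)) ≠ []
      ↔ ∃ p ∈ points, PySem.Int.floordiv (pvTsA p) bs * bs = j := by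
    rw [Ne, List.filter_eq_nil_iff]
    push_neg
    simp
  constructor
  · intro h
    apply h2.mp
    intro hnil
    exact (PySem.Dict.get?_eq_none_iff_not_mem_keys _ _).mp (h1.mpr hnil) h
  · intro hex
    by_contra hnot
    exact (h2.mpr hex) (h1.mp ((PySem.Dict.get?_eq_none_iff_not_mem_keys _ _).mpr hnot))

-- the representative selected for an inhabited bucket, with all its properties
theorem pv_rep (points : List (List (String × Int))) (bs b : Int) (hb0 : 0 < bs)
    (hmem : b ∈ (pvReps points bs).keys) :
    ∃ r, (pvReps points bs).get? b = some r ∧ (pvDA points bs).get? (b * bs) = some r ∧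
      r ∈ points ∧ PySem.Int.floordiv (pvTsA r) bs = b := by
  have hne : pvLf points bs b ≠ [] := (pv_lf_ne_nil_iff points bs b).mpr ((pv_mem_keysR points bs b).mp hmem)
  cases hL : pvLf points bs b with
  | nil => exact absurd hL hne
  | cons a u =>
      have hR := pv_reps_get? points bs b
      have hA := pv_DA_get? points bs b hb0
      rw [hL] at hR hA
      simp only [] at hR hA
      obtain ⟨r, hr⟩ := pv_pick_some u a
      have hfind : (a :: u).find? (fun p => decide (pvTsA p = pvMaxTs a u)) = some r := by
        rw [← pv_core, hr]
      have hrmem : r ∈ a :: u := List.mem_of_find?_eq_some (by rw [hfind])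
      have : r ∈ pvLf points bs b := by rw [hL]; exact hrmem
      unfold pvLf at this
      rw [List.mem_filter] at this
      exact ⟨r, by rw [hR, hfind], by rw [hA, hfind], this.1, by simpa using this.2⟩

theorem pv_body (points : List (List (String × Int))) (bs : Int) (hb : 5 < bs) :
    PySem.List.sorted (pvDA points bs).values (fun x => pvTsA x) false
      = (PySem.List.sorted (pvReps points bs).keys (fun b => b) false).map
          (fun b => (pvReps points bs).getD b []) := by
  have hb0 : (0:Int) < bs := by omega
  have hbne : bs ≠ 0 := by omega
  have hndA : (pvDA points bs).keys.Nodup :=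
    pv_nodupA bs points PySem.Dict.empty PySem.Dict.nodup_keys_empty
  have hndR : (pvReps points bs).keys.Nodup :=
    pv_nodupReps bs (pvBest points bs) points PySem.Dict.empty PySem.Dict.nodup_keys_empty
  have hgd : ∀ b, (pvReps points bs).getD b [] = (pvDA points bs).getD (b * bs) [] := by
    intro b
    rw [PySem.Dict.getD_eq_get?_getD, PySem.Dict.getD_eq_get?_getD, pv_reps_get?,
      pv_DA_get? points bs b hb0]
  apply PySem.List.sorted_eq_of_perm_of_pairwise_lt
  · have h1 : ((PySem.List.sorted (pvReps points bs).keys (fun b => b) false).map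
        (fun b => (pvReps points bs).getD b [])).Perm
          ((pvReps points bs).keys.map (fun b => (pvReps points bs).getD b [])) :=
      (PySem.List.sorted_perm _ _ _).map _
    have h2 : (pvReps points bs).keys.map (fun b => (pvReps points bs).getD b [])
        = ((pvReps points bs).keys.map (fun b => b * bs)).map (fun j => (pvDA points bs).getD j []) := by
      rw [List.map_map]
      exact List.map_congr_left (fun b _ => hgd b)
    have hkeysperm : ((pvReps points bs).keys.map (fun b => b * bs)).Perm (pvDA points bs).keys := by
      refine (List.perm_ext_iff_of_nodup ?_ hndA).mpr ?_
      · exact hndR.map (fun x y hxy => mul_right_cancel₀ hbne hxy)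
      · intro j
        rw [List.mem_map, pv_mem_keysA]
        constructor
        · rintro ⟨b, hbm, rfl⟩
          obtain ⟨p, hp, hpk⟩ := (pv_mem_keysR points bs b).mp hbm
          exact ⟨p, hp, by rw [hpk]⟩
        · rintro ⟨p, hp, rfl⟩
          exact ⟨_, (pv_mem_keysR points bs _).mpr ⟨p, hp, rfl⟩, rfl⟩
    have h3 := hkeysperm.map (fun j => (pvDA points bs).getD j [])
    have h4 : (pvDA points bs).keys.map (fun j => (pvDA points bs).getD j [])
        = (pvDA points bs).values := (PySem.Dict.values_eq_map_keys _ hndA []).symm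
    rw [h2] at h1
    exact h1.trans (h4 ▸ h3)
  · have hlt : (PySem.List.sorted (pvReps points bs).keys (fun b => b) false).Pairwise (· < ·) := by
      have hle := PySem.List.sorted_pairwise (pvReps points bs).keys (fun b => b)
      have hnd : (PySem.List.sorted (pvReps points bs).keys (fun b => b) false).Nodup :=
        ((PySem.List.sorted_perm _ _ _).nodup_iff).mpr hndR
      exact (hle.and hnd).imp (fun h => lt_of_le_of_ne h.1 h.2)
    rw [List.pairwise_map]
    refine hlt.imp_of_mem ?_
    intro a b ha hb' hab
    have haK : a ∈ (pvReps points bs).keys := (PySem.List.mem_sorted _ _ _ _).mp ha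
    have hbK : b ∈ (pvReps points bs).keys := (PySem.List.mem_sorted _ _ _ _).mp hb'
    obtain ⟨ra, hra, _, _, hka⟩ := pv_rep points bs a hb0 haK
    obtain ⟨rb, hrb, _, _, hkb⟩ := pv_rep points bs b hb0 hbK
    have hga : (pvReps points bs).getD a [] = ra := PySem.Dict.getD_of_get?_eq_some _ [] hra
    have hgb : (pvReps points bs).getD b [] = rb := PySem.Dict.getD_of_get?_eq_some _ [] hrb
    have hba : a * bs ≤ pvTsA ra ∧ pvTsA ra < (a + 1) * bs :=
      (PySem.Int.floordiv_eq_iff_of_pos hb0).mp hka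
    have hbb : b * bs ≤ pvTsA rb ∧ pvTsA rb < (b + 1) * bs :=
      (PySem.Int.floordiv_eq_iff_of_pos hb0).mp hkb
    have hmul : (a + 1) * bs ≤ b * bs :=
      mul_le_mul_of_nonneg_right (by omega) (le_of_lt hb0)
    show pvTsA ((pvReps points bs).getD a []) < pvTsA ((pvReps points bs).getD b [])
    rw [hga, hgb]
    exact lt_of_lt_of_le hba.2 (le_trans hmul hbb.1)

-- ===== VERDICT (by name: the statement is the Claim_ definition above) =====
theorem aggregate_to_buckets_py_spec : Claim_equal_aggregate_to_buckets_py := by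
  intro points bs _ _
  unfold Spec_aggregate_to_buckets_py aggregate_to_buckets_py aggregate_to_buckets_py_alt
  by_cases hg : points = [] ∨ bs ≤ 5
  · rw [if_pos hg, if_pos hg]
  · rw [if_neg hg, if_neg hg]
    have h5 : (5:Int) < bs := by
      by_contra hle
      exact hg (Or.inr (by omega))
    exact pv_body points bs h5
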